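-- pv_equiv track=rewrite | github.com/vaehanna/aois4 | main.py | PDNF
-- ===== SOURCE A (Python) =====
-- def PDNF(table, optionuments_number):
--     formula = []
--     optionuments = create_dictionary(optionuments_number)
--     for i in range(len(table)):
--         if table[i] == 1:
--             bracket = []
--             for option_index in range(1, optionuments_number + 1):
--                 bracket.append(optionuments['x' + str(option_index)][i])
--             formula.append(bracket)
--     return formula
--
-- def create_dictionary(optionuments_number):
--     dictionary = []
--     for i in range(optionuments_number):
--         index = i + 1
--         same = 2 ** (optionuments_number - index)
--         array = [0 for j in range(same)]
--         array += [1 for j in range(same)]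
--         while len(array) < 2 ** (optionuments_number):
--             array += array
--         dictionary.append(['x' + str(index), array])
--     dictionary = dict(dictionary)
--     return dictionary
-- ===== SOURCE B (Python) =====
-- def PDNF(table, optionuments_number):
--     formula = []
--     for i, v in enumerate(table):
--         if v == 1:
--             formula.append([(i // 2 ** (optionuments_number - k)) % 2
--                             for k in range(1, optionuments_number + 1)])
--     return formula
-- ===== Notes on version B (the rewrite author's own statement) =====
-- stated objective: simpler
-- what changed: B deletes create_dictionary entirely: instead of precomputing 2^n-long truth-table columns (built with a doubling while-loop) and looking them up through a string-keyed dict, it computes each variable's bit directly as (i // 2**(n - k)) % 2 in a single pass over the table.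
import Mathlib
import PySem

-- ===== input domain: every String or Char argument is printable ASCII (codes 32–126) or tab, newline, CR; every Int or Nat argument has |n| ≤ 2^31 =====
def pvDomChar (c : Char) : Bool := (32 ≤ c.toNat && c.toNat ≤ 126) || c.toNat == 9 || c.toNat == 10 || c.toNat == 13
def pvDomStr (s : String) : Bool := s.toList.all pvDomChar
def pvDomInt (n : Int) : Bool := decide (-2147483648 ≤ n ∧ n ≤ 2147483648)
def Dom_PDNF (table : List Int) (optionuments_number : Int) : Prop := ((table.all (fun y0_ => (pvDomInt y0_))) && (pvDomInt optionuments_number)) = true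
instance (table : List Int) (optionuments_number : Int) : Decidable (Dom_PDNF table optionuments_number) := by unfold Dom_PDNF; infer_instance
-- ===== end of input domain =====

-- B replaces A's precomputed 2^n-long truth-table columns and string-keyed dict by computing each
-- bit arithmetically as (i // 2**(n-k)) % 2 in one pass over the table (objective: simpler).

-- ===== PORT A =====
-- Python's 'while len(array) < 2 ** optionuments_number: array += array'.  The '0 < a.length'
-- conjunct only ensures termination in Lean; it holds on every call A makes (the start array has
-- length 2 * 2^(n-index) ≥ 2), so this is the exact loop.
def pvGrow (target : Nat) (a : List Int) : List Int :=
  if h : a.length < target ∧ 0 < a.length then pvGrow target (a ++ a) else a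
termination_by target - a.length
decreasing_by simp only [List.length_append]; omega

-- create_dictionary.  Python's '2 ** (optionuments_number - index)' has a nonnegative exponent on
-- every executed iteration (index ≤ optionuments_number), ported with '.toNat' on the exponent.
def pvCreateDict (optionuments_number : Int) : PySem.Dict String (List Int) :=
  PySem.Dict.ofList
    ((PySem.List.pyRange 0 optionuments_number 1).foldl (fun dictionary i =>
      dictionary ++
        [("x" ++ PySem.Int.toStr (i + 1),
          pvGrow (2 ^ optionuments_number.toNat)
            ((PySem.List.pyRange 0 ((2 : Int) ^ (optionuments_number - (i + 1)).toNat) 1).map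
                (fun _ => (0 : Int)) ++
             (PySem.List.pyRange 0 ((2 : Int) ^ (optionuments_number - (i + 1)).toNat) 1).map
                (fun _ => (1 : Int))))]) [])

-- The dict lookup optionuments['x' + str(k)] always finds its key (1 ≤ k ≤ n), and the column
-- index [i] is in range exactly on Pre_; both are ported with the default-carrying getD forms.
def PDNF (table : List Int) (optionuments_number : Int) : List (List Int) :=
  let optionuments := pvCreateDict optionuments_number
  (PySem.List.pyRange 0 (table.length : Int) 1).foldl (fun formula i =>
    if PySem.List.pyGetD table i 0 == 1 then
      formula ++
        [(PySem.List.pyRange 1 (optionuments_number + 1) 1).foldl (fun bracket option_index =>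
          bracket ++
            [PySem.List.pyGetD
              (optionuments.getD ("x" ++ PySem.Int.toStr option_index) []) i 0]) []]
    else formula) []

-- ===== PORT B =====
def PDNF_alt (table : List Int) (optionuments_number : Int) : List (List Int) :=
  (PySem.List.enumerate table).foldl (fun formula p =>
    if p.2 == 1 then
      formula ++
        [(PySem.List.pyRange 1 (optionuments_number + 1) 1).map (fun k =>
          PySem.Int.mod
            (PySem.Int.floordiv p.1 ((2 : Int) ^ (optionuments_number - k).toNat)) 2)]
    else formula) []

-- ===== PRECONDITION & SPEC =====
-- Pre_ excludes exactly the inputs where A raises IndexError: a 1 in the table at an index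
-- ≥ 2^optionuments_number when optionuments_number ≥ 1 (the truth-table columns have length
-- 2^optionuments_number).  A returns on every other input.
def Pre_PDNF (table : List Int) (optionuments_number : Int) : Prop :=
  optionuments_number ≤ 0 ∨
    ∀ j < table.length, table.getD j 0 = 1 → j < 2 ^ optionuments_number.toNat
instance (table : List Int) (optionuments_number : Int) : Decidable (Pre_PDNF table optionuments_number) := by unfold Pre_PDNF; infer_instance

def pvWitness_PDNF : List Int × Int := ([0, 1, 1, 0], 2)

def Spec_PDNF (table : List Int) (optionuments_number : Int) (out : List (List Int)) : Prop := out = PDNF_alt table optionuments_number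
instance (table : List Int) (optionuments_number : Int) (out : List (List Int)) : Decidable (Spec_PDNF table optionuments_number out) := by unfold Spec_PDNF; infer_instance

-- ===== CLAIM (what is proved, stated in full; the proofs are below) =====
def Claim_equal_PDNF : Prop := ∀ (table : List Int) (optionuments_number : Int), Dom_PDNF table optionuments_number → Pre_PDNF table optionuments_number → Spec_PDNF table optionuments_number (PDNF table optionuments_number)

-- ===== LEMMAS AND PROOFS =====

lemma pvDigitChar_inj10 : ∀ a < 10, ∀ b < 10, Nat.digitChar a = Nat.digitChar b → a = b := by
  decide

lemma pvToDigits10_inj : ∀ a b : Nat, Nat.toDigits 10 a = Nat.toDigits 10 b → a = b := by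
  intro a
  induction a using Nat.strong_induction_on with
  | _ a ih =>
    intro b h
    rw [Nat.toDigits_eq_if (n := a) (by norm_num), Nat.toDigits_eq_if (n := b) (by norm_num)] at h
    by_cases ha : a < 10 <;> by_cases hb : b < 10
    · rw [if_pos ha, if_pos hb] at h
      exact pvDigitChar_inj10 a ha b hb (by simpa using h)
    · rw [if_pos ha, if_neg hb] at h
      have hlen := congrArg List.length h
      simp only [List.length_cons, List.length_nil, List.length_append] at hlen
      have := @Nat.length_toDigits_pos 10 (b / 10)
      omega
    · rw [if_neg ha, if_pos hb] at h
      have hlen := congrArg List.length h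
      simp only [List.length_cons, List.length_nil, List.length_append] at hlen
      have := @Nat.length_toDigits_pos 10 (a / 10)
      omega
    · rw [if_neg ha, if_neg hb] at h
      obtain ⟨h1, h2⟩ := List.append_inj' h (by simp)
      have hd : a / 10 = b / 10 :=
        ih (a / 10) (Nat.div_lt_self (by omega) (by norm_num)) _ h1
      have hm : a % 10 = b % 10 :=
        pvDigitChar_inj10 _ (Nat.mod_lt _ (by norm_num)) _ (Nat.mod_lt _ (by norm_num))
          (by simpa using h2)
      omega

lemma pvKey_inj (a b : Int) (ha : 0 ≤ a) (hb : 0 ≤ b)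
    (h : "x" ++ PySem.Int.toStr a = "x" ++ PySem.Int.toStr b) : a = b := by
  have h' := congrArg String.toList h
  simp only [String.toList_append] at h'
  have h2 : (PySem.Int.toStr a).toList = (PySem.Int.toStr b).toList := by
    simpa using h'
  rw [PySem.Int.toList_toStr, PySem.Int.toList_toStr] at h2
  unfold PySem.Int.toChars at h2
  rw [if_neg (by omega), if_neg (by omega)] at h2
  have := pvToDigits10_inj _ _ h2
  omega

-- the grown column: position j holds bit (j / s) % 2, and the loop reaches length ≥ t
lemma pvGrow_spec (t s : Nat) (hs : 0 < s) :
    ∀ (c : Nat) (a : List Int) (m : Nat), t - a.length ≤ c → 0 < m → a.length = 2 * s * m →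
    (∀ j (hj : j < a.length), a[j] = ((j / s % 2 : Nat) : Int)) →
    t ≤ (pvGrow t a).length ∧
      ∀ j (hj : j < (pvGrow t a).length), (pvGrow t a)[j] = ((j / s % 2 : Nat) : Int) := by
  intro c
  induction c with
  | zero =>
    intro a m hc hm hlen hval
    have hpos : 0 < a.length := by
      have : 0 < 2 * s * m := by positivity
      omega
    rw [pvGrow, dif_neg (by omega)]
    exact ⟨by omega, hval⟩
  | succ c ih =>
    intro a m hc hm hlen hval
    rw [pvGrow]
    by_cases h : a.length < t ∧ 0 < a.length
    · rw [dif_pos h]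
      have hsm : s * (2 * m) = a.length := by rw [hlen]; ring
      refine ih (a ++ a) (2 * m) ?_ (by omega) ?_ ?_
      · simp only [List.length_append]; omega
      · simp only [List.length_append, hlen]; ring
      · intro j hj
        simp only [List.length_append] at hj
        by_cases hj2 : j < a.length
        · rw [List.getElem_append_left hj2]; exact hval j hj2
        · rw [List.getElem_append_right ((by omega))]
          rw [hval (j - a.length) (by omega)]
          congr 1
          have h1 : j - a.length + s * (2 * m) = j := by omega
          have h2 := Nat.add_mul_div_left (j - a.length) (2 * m) hs
          rw [h1] at h2
          rw [h2, Nat.add_mul_mod_self_left]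
    · have hpos : 0 < 2 * s * m := by positivity
      rw [dif_neg h]
      exact ⟨by omega, hval⟩


-- the dict built by create_dictionary, looked up at key 'x' + str(k), 1 ≤ k ≤ n
lemma pvCreateDict_getD (n k : Int) (hk1 : 1 ≤ k) (hkn : k ≤ n) :
    (pvCreateDict n).getD ("x" ++ PySem.Int.toStr k) [] =
      pvGrow (2 ^ n.toNat)
        ((PySem.List.pyRange 0 ((2 : Int) ^ (n - k).toNat) 1).map (fun _ => (0 : Int)) ++
         (PySem.List.pyRange 0 ((2 : Int) ^ (n - k).toNat) 1).map (fun _ => (1 : Int))) := by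
  unfold pvCreateDict
  rw [PySem.List.foldl_append_singleton_eq_map, List.nil_append]
  simp only [PySem.Dict.ofList, PySem.Dict.update, List.foldl_map]
  have hinj : ∀ x ∈ PySem.List.pyRange 0 n 1, ∀ y ∈ PySem.List.pyRange 0 n 1,
      ("x" ++ PySem.Int.toStr (x + 1)) = ("x" ++ PySem.Int.toStr (y + 1)) → x = y := by
    intro x hx y hy hxy
    rw [PySem.List.mem_pyRange_one] at hx hy
    have := pvKey_inj (x + 1) (y + 1) (by omega) (by omega) hxy
    omega
  have hnodup : ((PySem.List.pyRange 0 n 1).map (fun i => "x" ++ PySem.Int.toStr (i + 1))).Nodup :=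
    List.Nodup.map_on hinj (PySem.List.nodup_pyRange_one 0 n)
  have hitems := PySem.Dict.items_foldl_insert_fresh (PySem.List.pyRange 0 n 1)
    (fun i => "x" ++ PySem.Int.toStr (i + 1))
    (fun i => pvGrow (2 ^ n.toNat)
        ((PySem.List.pyRange 0 ((2 : Int) ^ (n - (i + 1)).toNat) 1).map (fun _ => (0 : Int)) ++
         (PySem.List.pyRange 0 ((2 : Int) ^ (n - (i + 1)).toNat) 1).map (fun _ => (1 : Int))))
    PySem.Dict.empty (fun a _ => PySem.Dict.contains_empty _) hnodup
  have hkeysnd := PySem.Dict.nodup_keys_foldl_insert_key (PySem.List.pyRange 0 n 1)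
    (fun i => "x" ++ PySem.Int.toStr (i + 1))
    (fun _ i => pvGrow (2 ^ n.toNat)
        ((PySem.List.pyRange 0 ((2 : Int) ^ (n - (i + 1)).toNat) 1).map (fun _ => (0 : Int)) ++
         (PySem.List.pyRange 0 ((2 : Int) ^ (n - (i + 1)).toNat) 1).map (fun _ => (1 : Int))))
    PySem.Dict.empty PySem.Dict.nodup_keys_empty
  have hmem : (k - 1) ∈ PySem.List.pyRange 0 n 1 :=
    PySem.List.mem_pyRange_one.mpr ⟨by omega, by omega⟩
  have hk' : k - 1 + 1 = k := by ring
  apply PySem.Dict.getD_of_mem_items _ _ hkeysnd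
  rw [hitems]
  apply List.mem_append_right
  have := List.mem_map_of_mem (l := PySem.List.pyRange 0 n 1)
    (f := fun i => ("x" ++ PySem.Int.toStr (i + 1),
      pvGrow (2 ^ n.toNat)
        ((PySem.List.pyRange 0 ((2 : Int) ^ (n - (i + 1)).toNat) 1).map (fun _ => (0 : Int)) ++
         (PySem.List.pyRange 0 ((2 : Int) ^ (n - (i + 1)).toNat) 1).map (fun _ => (1 : Int))))) hmem
  simpa only [hk'] using this

-- the column of variable k, read at row i < 2^n, is bit (i / 2^(n-k)) % 2
lemma pvCol_getD (n k : Int) (hk1 : 1 ≤ k) (hkn : k ≤ n) (i : Nat) (hi : i < 2 ^ n.toNat) :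
    PySem.List.pyGetD
      (pvGrow (2 ^ n.toNat)
        ((PySem.List.pyRange 0 ((2 : Int) ^ (n - k).toNat) 1).map (fun _ => (0 : Int)) ++
         (PySem.List.pyRange 0 ((2 : Int) ^ (n - k).toNat) 1).map (fun _ => (1 : Int))))
      (i : Nat) 0 = ((i / 2 ^ (n - k).toNat % 2 : Nat) : Int) := by
  have hs : 0 < 2 ^ (n - k).toNat := by positivity
  have hrlen : (PySem.List.pyRange 0 ((2 : Int) ^ (n - k).toNat) 1).length = 2 ^ (n - k).toNat := by
    rw [PySem.List.length_pyRange_one, sub_zero]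
    push_cast
    exact Int.toNat_natCast _
  have hlen : ((PySem.List.pyRange 0 ((2 : Int) ^ (n - k).toNat) 1).map (fun _ => (0 : Int)) ++
      (PySem.List.pyRange 0 ((2 : Int) ^ (n - k).toNat) 1).map (fun _ => (1 : Int))).length
      = 2 * 2 ^ (n - k).toNat * 1 := by
    rw [List.length_append, List.length_map, List.length_map, hrlen]; ring
  have hval : ∀ j (hj : j < ((PySem.List.pyRange 0 ((2 : Int) ^ (n - k).toNat) 1).map
        (fun _ => (0 : Int)) ++
      (PySem.List.pyRange 0 ((2 : Int) ^ (n - k).toNat) 1).map (fun _ => (1 : Int))).length),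
      ((PySem.List.pyRange 0 ((2 : Int) ^ (n - k).toNat) 1).map (fun _ => (0 : Int)) ++
       (PySem.List.pyRange 0 ((2 : Int) ^ (n - k).toNat) 1).map (fun _ => (1 : Int)))[j]
        = ((j / 2 ^ (n - k).toNat % 2 : Nat) : Int) := by
    intro j hj
    rw [hlen] at hj
    by_cases hjs : j < 2 ^ (n - k).toNat
    · rw [List.getElem_append_left (by rw [List.length_map, hrlen]; exact hjs), List.getElem_map]
      rw [Nat.div_eq_of_lt hjs]
      norm_num
    · rw [List.getElem_append_right (by rw [List.length_map, hrlen]; omega), List.getElem_map]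
      have hdiv : j / 2 ^ (n - k).toNat = 1 :=
        Nat.div_eq_of_lt_le (by omega) (by omega)
      rw [hdiv]
      norm_num
  obtain ⟨hge, hout⟩ := pvGrow_spec (2 ^ n.toNat) (2 ^ (n - k).toNat) hs (2 ^ n.toNat)
    ((PySem.List.pyRange 0 ((2 : Int) ^ (n - k).toNat) 1).map (fun _ => (0 : Int)) ++
     (PySem.List.pyRange 0 ((2 : Int) ^ (n - k).toNat) 1).map (fun _ => (1 : Int))) 1
    (by omega) (by omega) hlen hval
  rw [PySem.List.pyGetD_natCast, List.getD_eq_getElem _ _ (by omega)]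
  exact hout i (by omega)

-- the inner loop of A equals the inner comprehension of B at any admitted row i
lemma pvBracket_eq (n : Int) (i : Nat) (hpre : n ≤ 0 ∨ i < 2 ^ n.toNat) :
    (PySem.List.pyRange 1 (n + 1) 1).foldl (fun bracket option_index =>
        bracket ++
          [PySem.List.pyGetD
            ((pvCreateDict n).getD ("x" ++ PySem.Int.toStr option_index) []) (i : Int) 0]) [] =
      (PySem.List.pyRange 1 (n + 1) 1).map (fun k =>
        PySem.Int.mod (PySem.Int.floordiv (i : Int) ((2 : Int) ^ (n - k).toNat)) 2) := by
  rw [PySem.List.foldl_append_singleton_eq_map, List.nil_append]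
  by_cases hn : n ≤ 0
  · rw [PySem.List.pyRange_one_eq_nil (by omega)]
    rfl
  · apply List.map_congr_left
    intro k hk
    rw [PySem.List.mem_pyRange_one] at hk
    have hi : i < 2 ^ n.toNat := by tauto
    rw [pvCreateDict_getD n k hk.1 (by omega), pvCol_getD n k hk.1 (by omega) i hi]
    have h2 : (2 : Int) ^ (n - k).toNat = ((2 ^ (n - k).toNat : Nat) : Int) := by push_cast; rfl
    rw [h2, PySem.Int.floordiv_natCast]
    have h3 : (2 : Int) = ((2 : Nat) : Int) := rfl
    rw [h3, PySem.Int.mod_natCast]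

-- ===== VERDICT (by name: the statement is the Claim_ definition above) =====
theorem PDNF_spec : Claim_equal_PDNF := by
  intro table n _ hpre
  unfold Spec_PDNF
  simp only [PDNF, PDNF_alt]
  rw [PySem.List.enumerate_eq_map_pyRange table 0, List.foldl_map]
  rw [PySem.List.foldl_append_if, PySem.List.foldl_append_if]
  simp only [List.nil_append, PySem.List.len_eq]
  apply List.map_congr_left
  intro i hi
  rw [List.mem_filter] at hi
  obtain ⟨hmem, hsel⟩ := hi
  rw [PySem.List.mem_pyRange_one] at hmem
  have h0 : 0 ≤ i := hmem.1
  have hlt : i < (table.length : Int) := hmem.2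
  have hi' : i = ((i.toNat : Nat) : Int) := (Int.toNat_of_nonneg h0).symm
  have hsel' : table[i.toNat] = 1 := by
    rw [beq_iff_eq, PySem.List.pyGetD_eq_getElem table 0 h0 hlt] at hsel
    exact hsel
  have hpre' : n ≤ 0 ∨ i.toNat < 2 ^ n.toNat := by
    rcases hpre with h | h
    · exact Or.inl h
    · right
      apply h i.toNat (by omega)
      rw [List.getD_eq_getElem table 0 (by omega)]
      exact hsel'
  rw [hi']
  exact pvBracket_eq n i.toNat hpre'
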